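-- pv_equiv track=rewrite | github.com/Stage-11-Agentics/lattice | scripts/lattice_art.py | make_hex_lattice
-- ===== SOURCE A (Python) =====
-- def make_hex_lattice(cols: int = 36, rows: int = 24) -> list[list[int]]:
--     """Hexagonal/honeycomb lattice pattern."""
--     grid = [[0] * cols for _ in range(rows)]
--
--     hex_w = 8  # Width of hex cell
--     hex_h = 6  # Height of hex cell
--
--     for y in range(rows):
--         for x in range(cols):
--             cell_row = y // hex_h
--             local_y = y % hex_h
--             offset = (hex_w // 2) if cell_row % 2 == 1 else 0
--             local_x = (x + offset) % hex_w
--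
--             # Top edge: / and \
--             if local_y == 0 and (local_x == 0 or local_x == hex_w - 1):
--                 grid[y][x] = 1
--             # Ascending left edge
--             if local_y == 1 and local_x == hex_w - 1:
--                 grid[y][x] = 1
--             if local_y == 1 and local_x == 0:
--                 grid[y][x] = 1
--             # Horizontal top
--             if local_y == 0 and 1 <= local_x <= hex_w - 2:
--                 grid[y][x] = 1
--             # Sides
--             if local_y in (1, 2, 3, 4) and (local_x == 0):
--                 grid[y][x] = 1
--             # Bottom horizontal
--             if local_y == hex_h - 1 and 1 <= local_x <= hex_w - 2:
--                 grid[y][x] = 1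
--     return grid
-- ===== SOURCE B (Python) =====
-- # Template-then-tile: precompute one 6x8 hex cell, then tile it with the row offset.
-- _HEX_TEMPLATE = [
--     [1, 1, 1, 1, 1, 1, 1, 1],  # top edge (corners + horizontal top cover the row)
--     [1, 0, 0, 0, 0, 0, 0, 1],  # upper side walls
--     [1, 0, 0, 0, 0, 0, 0, 0],  # left side
--     [1, 0, 0, 0, 0, 0, 0, 0],
--     [1, 0, 0, 0, 0, 0, 0, 0],
--     [0, 1, 1, 1, 1, 1, 1, 0],  # bottom horizontal
-- ]
--
--
-- def make_hex_lattice(cols: int = 36, rows: int = 24) -> list[list[int]]: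
--     """Hexagonal/honeycomb lattice pattern."""
--     hex_w, hex_h = 8, 6
--     grid = []
--     for y in range(rows):
--         trow = _HEX_TEMPLATE[y % hex_h]
--         offset = (hex_w // 2) if (y // hex_h) % 2 == 1 else 0
--         grid.append([trow[(x + offset) % hex_w] for x in range(cols)])
--     return grid
-- ===== Notes on version B (the rewrite author's own statement) =====
-- stated objective: simpler
-- what changed: B precomputes one 6x8 template tile (the six edge conditions collapsed into literal 0/1 rows) and fills each output row by a modular lookup into the shifted template row, instead of A's per-cell re-evaluation of six conditional writes into a preallocated grid.
import Mathlib
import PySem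

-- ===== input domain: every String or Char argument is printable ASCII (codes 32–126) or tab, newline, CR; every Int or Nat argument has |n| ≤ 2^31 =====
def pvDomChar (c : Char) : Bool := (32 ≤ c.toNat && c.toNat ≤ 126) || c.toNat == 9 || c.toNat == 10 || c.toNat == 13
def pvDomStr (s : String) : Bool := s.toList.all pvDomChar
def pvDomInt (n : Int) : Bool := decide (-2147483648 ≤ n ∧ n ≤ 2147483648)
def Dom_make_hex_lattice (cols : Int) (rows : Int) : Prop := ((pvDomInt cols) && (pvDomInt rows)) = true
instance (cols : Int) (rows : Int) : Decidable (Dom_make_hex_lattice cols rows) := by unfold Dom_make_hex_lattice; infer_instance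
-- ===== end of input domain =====

-- B replaces A's per-cell six-condition branch chain by a precomputed 6x8 template row
-- tiled across each output row (simpler two-phase decomposition; same cost).


-- ===== PORT A =====
-- grid[y][x] = 1 (both indices come from range(...), hence nonnegative and in range:
-- the total pySetD/pyGetD forms are exact here)
def hexSet1 (grid : List (List Int)) (y x : Int) : List (List Int) :=
  PySem.List.pySetD grid y (PySem.List.pySetD (PySem.List.pyGetD grid y []) x 1)

def make_hex_lattice (cols : Int) (rows : Int) : List (List Int) :=
  -- grid = [[0] * cols for _ in range(rows)]
  let grid := (PySem.List.pyRange 0 rows 1).map (fun _ => PySem.List.pyRepeat [(0 : Int)] cols)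
  (PySem.List.pyRange 0 rows 1).foldl (fun grid y =>
    (PySem.List.pyRange 0 cols 1).foldl (fun grid x =>
      let cell_row := PySem.Int.floordiv y 6
      let local_y := PySem.Int.mod y 6
      let offset := if PySem.Int.mod cell_row 2 = 1 then PySem.Int.floordiv 8 2 else 0
      let local_x := PySem.Int.mod (x + offset) 8
      let grid := if local_y = 0 ∧ (local_x = 0 ∨ local_x = 8 - 1) then hexSet1 grid y x else grid
      let grid := if local_y = 1 ∧ local_x = 8 - 1 then hexSet1 grid y x else grid
      let grid := if local_y = 1 ∧ local_x = 0 then hexSet1 grid y x else grid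
      let grid := if local_y = 0 ∧ (1 ≤ local_x ∧ local_x ≤ 8 - 2) then hexSet1 grid y x else grid
      let grid := if (local_y = 1 ∨ local_y = 2 ∨ local_y = 3 ∨ local_y = 4) ∧ local_x = 0 then hexSet1 grid y x else grid
      let grid := if local_y = 6 - 1 ∧ (1 ≤ local_x ∧ local_x ≤ 8 - 2) then hexSet1 grid y x else grid
      grid) grid) grid

-- ===== PORT B =====
def hexTemplate : List (List Int) :=
  [[1, 1, 1, 1, 1, 1, 1, 1],
   [1, 0, 0, 0, 0, 0, 0, 1],
   [1, 0, 0, 0, 0, 0, 0, 0],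
   [1, 0, 0, 0, 0, 0, 0, 0],
   [1, 0, 0, 0, 0, 0, 0, 0],
   [0, 1, 1, 1, 1, 1, 1, 0]]

-- indices y % 6 and (x + offset) % 8 are always in range of the 6x8 template:
-- the total pyGetD forms are exact here
def make_hex_lattice_alt (cols : Int) (rows : Int) : List (List Int) :=
  (PySem.List.pyRange 0 rows 1).foldl (fun grid y =>
    let trow := PySem.List.pyGetD hexTemplate (PySem.Int.mod y 6) []
    let offset := if PySem.Int.mod (PySem.Int.floordiv y 6) 2 = 1 then PySem.Int.floordiv 8 2 else 0
    grid ++ [(PySem.List.pyRange 0 cols 1).map (fun x =>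
      PySem.List.pyGetD trow (PySem.Int.mod (x + offset) 8) 0)]) []

-- ===== PRECONDITION & SPEC =====
def Spec_make_hex_lattice (cols : Int) (rows : Int) (out : List (List Int)) : Prop := out = make_hex_lattice_alt cols rows
instance (cols : Int) (rows : Int) (out : List (List Int)) : Decidable (Spec_make_hex_lattice cols rows out) := by unfold Spec_make_hex_lattice; infer_instance

-- ===== CLAIM (what is proved, stated in full; the proofs are below) =====
def Claim_equal_make_hex_lattice : Prop := ∀ (cols : Int) (rows : Int), Dom_make_hex_lattice cols rows → Spec_make_hex_lattice cols rows (make_hex_lattice cols rows)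

-- ===== LEMMAS AND PROOFS =====

-- row offset of row y, as in both programs
def hexOff (y : Int) : Int :=
  if PySem.Int.mod (PySem.Int.floordiv y 6) 2 = 1 then PySem.Int.floordiv 8 2 else 0

-- the union of A's six edge conditions, over the local coordinates
def hexCond (a b : Int) : Bool :=
  (a == 0 && (b == 0 || b == 7)) || (a == 1 && b == 7) || (a == 1 && b == 0) ||
  (a == 0 && (decide (1 ≤ b) && decide (b ≤ 6))) ||
  ((a == 1 || a == 2 || a == 3 || a == 4) && b == 0) ||
  (a == 5 && (decide (1 ≤ b) && decide (b ≤ 6)))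

-- the set-form of hexSet1 on nonnegative indices
def setCell (g : List (List Int)) (yn xn : Nat) : List (List Int) :=
  g.set yn ((g.getD yn []).set xn 1)

-- one write of A's inner loop, acting on the row alone
def rowStep (y : Int) (r : List Int) (x : Int) : List Int :=
  if hexCond (PySem.Int.mod y 6) (PySem.Int.mod (x + hexOff y) 8) = true then r.set x.toNat 1 else r

def rowUpd (y cols : Int) (r : List Int) : List Int :=
  (PySem.List.pyRange 0 cols 1).foldl (rowStep y) r

-- one iteration of A's outer loop, in localized form
def gridStep (cols : Int) (g : List (List Int)) (y : Int) : List (List Int) :=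
  g.set y.toNat (rowUpd y cols (g.getD y.toNat []))

lemma getD_set_self {α : Type} (g : List α) (n : Nat) (r d : α) (h : n < g.length) :
    (g.set n r).getD n d = r := by
  simp [List.getD, h]

lemma getD_set_ne {α : Type} (g : List α) (n m : Nat) (r d : α) (h : n ≠ m) :
    (g.set n r).getD m d = g.getD m d := by
  simp [List.getD, h]

lemma hexSet1_eq_setCell (g : List (List Int)) (y x : Int) (hy : 0 ≤ y) (hx : 0 ≤ x) :
    hexSet1 g y x = setCell g y.toNat x.toNat := by
  simp [hexSet1, setCell, PySem.List.pySetD_of_nonneg _ _ hy, PySem.List.pySetD_of_nonneg _ _ hx,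
    PySem.List.pyGetD_of_nonneg _ _ hy]

lemma getD_setCell_self (g : List (List Int)) (yn xn : Nat) :
    (setCell g yn xn).getD yn [] = (g.getD yn []).set xn 1 := by
  by_cases h : yn < g.length
  · rw [setCell, getD_set_self _ _ _ _ h]
  · have h' : g.length ≤ yn := by omega
    simp [setCell, List.set_eq_of_length_le h', List.getD, List.getElem?_eq_none h']

lemma setCell_idem (g : List (List Int)) (yn xn : Nat) :
    setCell (setCell g yn xn) yn xn = setCell g yn xn := by
  conv_lhs => rw [setCell, getD_setCell_self]
  simp [setCell, List.set_set]

-- six chained conditional applications of an idempotent update collapse to one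
lemma chain_if {α : Type} (S : α → α) (hS : ∀ a, S (S a) = S a)
    (c1 c2 c3 c4 c5 c6 : Prop) [Decidable c1] [Decidable c2] [Decidable c3] [Decidable c4]
    [Decidable c5] [Decidable c6] (g : α) :
    (let g1 := if c1 then S g else g
     let g2 := if c2 then S g1 else g1
     let g3 := if c3 then S g2 else g2
     let g4 := if c4 then S g3 else g3
     let g5 := if c5 then S g4 else g4
     let g6 := if c6 then S g5 else g5
     g6) = if c1 ∨ c2 ∨ c3 ∨ c4 ∨ c5 ∨ c6 then S g else g := by
  simp only []
  split_ifs <;> simp_all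

-- A's inner-loop body collapses to one conditional cell write
lemma bodyA_collapse (g : List (List Int)) (y x : Int) (hy : 0 ≤ y) (hx : 0 ≤ x) :
    (let cell_row := PySem.Int.floordiv y 6
     let local_y := PySem.Int.mod y 6
     let offset := if PySem.Int.mod cell_row 2 = 1 then PySem.Int.floordiv 8 2 else 0
     let local_x := PySem.Int.mod (x + offset) 8
     let grid := if local_y = 0 ∧ (local_x = 0 ∨ local_x = 8 - 1) then hexSet1 g y x else g
     let grid := if local_y = 1 ∧ local_x = 8 - 1 then hexSet1 grid y x else grid
     let grid := if local_y = 1 ∧ local_x = 0 then hexSet1 grid y x else grid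
     let grid := if local_y = 0 ∧ (1 ≤ local_x ∧ local_x ≤ 8 - 2) then hexSet1 grid y x else grid
     let grid := if (local_y = 1 ∨ local_y = 2 ∨ local_y = 3 ∨ local_y = 4) ∧ local_x = 0 then hexSet1 grid y x else grid
     let grid := if local_y = 6 - 1 ∧ (1 ≤ local_x ∧ local_x ≤ 8 - 2) then hexSet1 grid y x else grid
     grid) =
    (if hexCond (PySem.Int.mod y 6) (PySem.Int.mod (x + hexOff y) 8) = true
     then setCell g y.toNat x.toNat else g) := by
  have hoff : (if PySem.Int.mod (PySem.Int.floordiv y 6) 2 = 1 then PySem.Int.floordiv 8 2 else 0)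
      = hexOff y := rfl
  simp only [hexSet1_eq_setCell _ _ _ hy hx, hoff]
  set a := PySem.Int.mod y 6 with ha
  set b := PySem.Int.mod (x + hexOff y) 8 with hb
  have hiff : (hexCond a b = true) ↔
      ((a = 0 ∧ (b = 0 ∨ b = 8 - 1)) ∨ (a = 1 ∧ b = 8 - 1) ∨ (a = 1 ∧ b = 0) ∨
       (a = 0 ∧ (1 ≤ b ∧ b ≤ 8 - 2)) ∨ ((a = 1 ∨ a = 2 ∨ a = 3 ∨ a = 4) ∧ b = 0) ∨
       (a = 6 - 1 ∧ (1 ≤ b ∧ b ≤ 8 - 2))) := by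
    simp [hexCond]
    omega
  rw [if_congr hiff (rfl) (rfl)]
  exact chain_if (fun g => setCell g y.toNat x.toNat) (fun a => setCell_idem a _ _) _ _ _ _ _ _ g

-- template lookup agrees with the union of the six conditions on local coordinates
lemma template_lookup (a b : Int) (ha0 : 0 ≤ a) (ha : a < 6) (hb0 : 0 ≤ b) (hb : b < 8) :
    PySem.List.pyGetD (PySem.List.pyGetD hexTemplate a []) b 0 =
      if hexCond a b = true then 1 else 0 := by
  interval_cases a <;> interval_cases b <;> decide

lemma rowStep_nil (y x : Int) : rowStep y [] x = [] := by
  simp [rowStep]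

lemma foldl_rowStep_nil (y : Int) (xs : List Int) : xs.foldl (rowStep y) [] = [] := by
  induction xs with
  | nil => rfl
  | cons x xs ih => simp [rowStep_nil, ih]

lemma length_rowStep (y : Int) (r : List Int) (x : Int) :
    (rowStep y r x).length = r.length := by
  rw [rowStep]; split <;> simp

lemma length_foldl_rowStep (y : Int) (xs : List Int) (r : List Int) :
    (xs.foldl (rowStep y) r).length = r.length := by
  induction xs generalizing r with
  | nil => rfl
  | cons x xs ih => rw [List.foldl_cons, ih, length_rowStep]

-- pointwise value of the row fold
lemma foldl_rowStep_getD (y : Int) (xs : List Int) (r : List Int) (k : Nat)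
    (hxs : ∀ x ∈ xs, 0 ≤ x ∧ x.toNat < r.length) :
    (xs.foldl (rowStep y) r).getD k 0 =
      if (k : Int) ∈ xs ∧ hexCond (PySem.Int.mod y 6) (PySem.Int.mod ((k : Int) + hexOff y) 8) = true
      then 1 else r.getD k 0 := by
  induction xs generalizing r with
  | nil => simp
  | cons x xs ih =>
    have hx := hxs x (List.mem_cons_self)
    have hxs' : ∀ x' ∈ xs, 0 ≤ x' ∧ x'.toNat < (rowStep y r x).length := by
      intro x' hx'; rw [length_rowStep]; exact hxs x' (List.mem_cons_of_mem _ hx')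
    rw [List.foldl_cons, ih _ hxs']
    by_cases hmem : (k : Int) ∈ xs ∧
        hexCond (PySem.Int.mod y 6) (PySem.Int.mod ((k : Int) + hexOff y) 8) = true
    · obtain ⟨hm, hc⟩ := hmem
      rw [if_pos ⟨hm, hc⟩, if_pos ⟨List.mem_cons_of_mem x hm, hc⟩]
    · rw [if_neg hmem]
      by_cases hxk : x = (k : Int)
      · by_cases hc : hexCond (PySem.Int.mod y 6) (PySem.Int.mod ((k : Int) + hexOff y) 8) = true
        · have hk : x.toNat = k := by omega
          have hkl : k < r.length := hk ▸ hx.2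
          rw [rowStep, hxk, Int.toNat_natCast, if_pos hc, getD_set_self _ _ _ _ hkl]
          rw [if_pos ⟨List.mem_cons.mpr (Or.inl rfl), hc⟩]
        · rw [rowStep, hxk, if_neg hc, if_neg (fun h => hc h.2)]
      · have hne : x.toNat ≠ k := by omega
        have hnc : ¬((k : Int) ∈ x :: xs ∧
            hexCond (PySem.Int.mod y 6) (PySem.Int.mod ((k : Int) + hexOff y) 8) = true) := by
          intro h
          rcases List.mem_cons.mp h.1 with h1 | h1
          · exact hxk h1.symm
          · exact hmem ⟨h1, h.2⟩
        rw [if_neg hnc, rowStep]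
        split
        · exact getD_set_ne _ _ _ _ _ hne
        · rfl

lemma length_foldl_gridStep (cols : Int) (ys : List Int) (g : List (List Int)) :
    (ys.foldl (gridStep cols) g).length = g.length := by
  induction ys generalizing g with
  | nil => rfl
  | cons y ys ih => simp [gridStep, ih]

-- pointwise row of the outer fold
lemma foldl_gridStep_getD (cols : Int) (ys : List Int) (g : List (List Int)) (k : Nat)
    (hnd : ys.Nodup) (hys : ∀ y ∈ ys, 0 ≤ y) :
    (ys.foldl (gridStep cols) g).getD k [] =
      if (k : Int) ∈ ys then rowUpd (k : Int) cols (g.getD k []) else g.getD k [] := by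
  induction ys generalizing g with
  | nil => simp
  | cons y ys ih =>
    have hy : 0 ≤ y := hys y (by simp)
    have hnd' := hnd.of_cons
    have hys' : ∀ y' ∈ ys, 0 ≤ y' := fun y' h => hys y' (by simp [h])
    rw [List.foldl_cons, ih _ hnd' hys']
    by_cases hyk : y = (k : Int)
    · have hk : y.toNat = k := by omega
      have hmemtail : (k : Int) ∉ ys := hyk ▸ (List.nodup_cons.mp hnd).1
      rw [if_neg hmemtail]
      have hmemhead : (k : Int) ∈ y :: ys := List.mem_cons.mpr (Or.inl hyk.symm)
      by_cases hlen : k < g.length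
      · rw [gridStep, hk, getD_set_self _ _ _ _ hlen, if_pos hmemhead, ← hyk]
      · have h' : g.length ≤ k := by omega
        rw [gridStep, hk, List.set_eq_of_length_le (hk ▸ h')]
        have hnil : g.getD k [] = [] := by
          simp [List.getD, List.getElem?_eq_none h']
        rw [if_pos hmemhead, hnil, rowUpd, foldl_rowStep_nil]
    · have hne : y.toNat ≠ k := by omega
      rw [gridStep, getD_set_ne _ _ _ _ _ hne]
      by_cases hmem : (k : Int) ∈ ys
      · rw [if_pos hmem, if_pos (List.mem_cons_of_mem _ hmem)]
      · have hnc : (k : Int) ∉ y :: ys := by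
          intro h
          rcases List.mem_cons.mp h with h1 | h1
          · exact hyk h1.symm
          · exact hmem h1
        rw [if_neg hmem, if_neg hnc]

-- A's inner loop, localized to row y
lemma inner_localize (y : Int) (xs : List Int) (hxs : ∀ x ∈ xs, 0 ≤ x) :
    ∀ g : List (List Int),
      xs.foldl (fun g x =>
        if hexCond (PySem.Int.mod y 6) (PySem.Int.mod (x + hexOff y) 8) = true
        then setCell g y.toNat x.toNat else g) g =
      g.set y.toNat (xs.foldl (rowStep y) (g.getD y.toNat [])) := by
  induction xs with
  | nil =>
    intro g
    simp only [List.foldl_nil]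
    by_cases h : y.toNat < g.length
    · rw [List.getD_eq_getElem _ _ h]
      simp
    · rw [List.set_eq_of_length_le (by omega)]
  | cons x xs ih =>
    intro g
    have hx : 0 ≤ x := hxs x (by simp)
    have hxs' : ∀ x' ∈ xs, 0 ≤ x' := fun x' h => hxs x' (by simp [h])
    rw [List.foldl_cons, List.foldl_cons]
    by_cases hc : hexCond (PySem.Int.mod y 6) (PySem.Int.mod (x + hexOff y) 8) = true
    · rw [if_pos hc, rowStep, if_pos hc, ih hxs' (setCell g y.toNat x.toNat),
        getD_setCell_self]
      simp [setCell, List.set_set]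
    · rw [if_neg hc, rowStep, if_neg hc, ih hxs' g]

-- A's whole computation, as the localized outer fold
lemma make_hex_lattice_eq_foldl_gridStep (cols rows : Int) :
    make_hex_lattice cols rows =
      (PySem.List.pyRange 0 rows 1).foldl (gridStep cols)
        ((PySem.List.pyRange 0 rows 1).map (fun _ => List.replicate cols.toNat 0)) := by
  rw [make_hex_lattice]
  simp only [PySem.List.pyRepeat_singleton]
  apply PySem.List.foldl_congr_mem
  intro g y hy
  have hy0 : 0 ≤ y := ((PySem.List.mem_pyRange_one).mp hy).1
  calc (PySem.List.pyRange 0 cols 1).foldl _ g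
      = (PySem.List.pyRange 0 cols 1).foldl (fun g x =>
          if hexCond (PySem.Int.mod y 6) (PySem.Int.mod (x + hexOff y) 8) = true
          then setCell g y.toNat x.toNat else g) g := by
        apply PySem.List.foldl_congr_mem
        intro g' x hx
        exact bodyA_collapse g' y x hy0 ((PySem.List.mem_pyRange_one).mp hx).1
    _ = _ := inner_localize y _ (fun x hx => ((PySem.List.mem_pyRange_one).mp hx).1) g

-- B's per-cell value is the template lookup; it equals the condition union
lemma cellVal_eq (y x : Int) :
    PySem.List.pyGetD (PySem.List.pyGetD hexTemplate (PySem.Int.mod y 6) [])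
      (PySem.Int.mod (x + hexOff y) 8) 0 =
    if hexCond (PySem.Int.mod y 6) (PySem.Int.mod (x + hexOff y) 8) = true then 1 else 0 := by
  exact template_lookup _ _ (PySem.Int.mod_nonneg _ (by norm_num)) (PySem.Int.mod_lt _ (by norm_num))
    (PySem.Int.mod_nonneg _ (by norm_num)) (PySem.Int.mod_lt _ (by norm_num))

-- one row of A equals one row of B
lemma row_eq (y cols : Int) :
    rowUpd y cols (List.replicate cols.toNat 0) =
      (PySem.List.pyRange 0 cols 1).map (fun x =>
        PySem.List.pyGetD (PySem.List.pyGetD hexTemplate (PySem.Int.mod y 6) [])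
          (PySem.Int.mod (x + hexOff y) 8) 0) := by
  apply List.ext_getElem
  · simp [rowUpd, length_foldl_rowStep, PySem.List.length_pyRange_one]
  · intro j hj hj'
    have hjc : j < cols.toNat := by
      simpa [rowUpd, length_foldl_rowStep] using hj
    have hgd : (rowUpd y cols (List.replicate cols.toNat 0)).getD j 0 =
        (rowUpd y cols (List.replicate cols.toNat 0))[j] :=
      List.getD_eq_getElem _ _ hj
    rw [← hgd, rowUpd, foldl_rowStep_getD _ _ _ _
      (fun x hx => by
        have := (PySem.List.mem_pyRange_one).mp hx
        constructor
        · exact this.1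
        · simp only [List.length_replicate]; omega)]
    have hmem : (j : Int) ∈ PySem.List.pyRange 0 cols 1 := by
      rw [PySem.List.mem_pyRange_one]; omega
    rw [List.getElem_map, PySem.List.getElem_pyRange_one]
    simp only [zero_add]
    rw [cellVal_eq]
    by_cases hc : hexCond (PySem.Int.mod y 6) (PySem.Int.mod ((j:Int) + hexOff y) 8) = true
    · rw [if_pos ⟨hmem, hc⟩, if_pos hc]
    · rw [if_neg hc, if_neg (fun h => hc h.2),
        List.getD_eq_getElem _ _ (show j < (List.replicate cols.toNat (0:Int)).length by simpa using hjc),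
        List.getElem_replicate]

-- ===== VERDICT (by name: the statement is the Claim_ definition above) =====
theorem make_hex_lattice_spec : Claim_equal_make_hex_lattice := by
  intro cols rows _
  unfold Spec_make_hex_lattice
  rw [make_hex_lattice_eq_foldl_gridStep, make_hex_lattice_alt]
  rw [PySem.List.foldl_append_singleton_eq_map]
  simp only [List.nil_append]
  apply List.ext_getElem
  · simp [length_foldl_gridStep, PySem.List.length_pyRange_one]
  · intro i hi hi'
    have hic : i < rows.toNat := by
      simpa [length_foldl_gridStep, PySem.List.length_pyRange_one] using hi
    have hgd : _ = _ := List.getD_eq_getElem ((PySem.List.pyRange 0 rows 1).foldl (gridStep cols)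
      ((PySem.List.pyRange 0 rows 1).map (fun _ => List.replicate cols.toNat 0))) ([] : List Int) hi
    rw [← hgd]
    rw [foldl_gridStep_getD _ _ _ _ (PySem.List.nodup_pyRange_one _ _)
      (fun y hy' => ((PySem.List.mem_pyRange_one).mp hy').1)]
    have hmem : (i : Int) ∈ PySem.List.pyRange 0 rows 1 := by
      rw [PySem.List.mem_pyRange_one]; omega
    rw [if_pos hmem]
    have hinit : ((PySem.List.pyRange 0 rows 1).map
        (fun _ => List.replicate cols.toNat (0:Int))).getD i [] = List.replicate cols.toNat 0 := by
      rw [List.getD_eq_getElem _ _ (by simpa [PySem.List.length_pyRange_one] using hic)]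
      simp
    rw [hinit, List.getElem_map, row_eq]
    rw [PySem.List.getElem_pyRange_one]
    simp [hexOff]
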